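-- pv_equiv track=rewrite | github.com/Boon-Jun/CS3245-HW3 | queryParser.py | removeRedundantBrackets
-- ===== SOURCE A (Python) =====
-- def removeRedundantBrackets(queryList):
--     ''' This method removes all brackets
--         that does not have a 'NOT' expression
--         immediately preceding it and does not DIRECTLY encloses
--         an 'OR' expression.
--
--         That is the 'OR' expression is enclosed
--         by the bracket(1), but it is not
--         enclosed by another bracket(2) such that
--         (1) encloses (2). '''
--     hasNotOperator = False
--     withinBrackets = False
--     validBracket = False
--     openBracketPos = -1
--     validBracketHistoryStack = []
--     invalidBrackets = set()
--     for x in range(len(queryList)):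
--         token = queryList[x]
--         if withinBrackets:
--             if token == '(':
--                 validBracketHistoryStack.append((openBracketPos, validBracket))
--                 if hasNotOperator:
--                     validBracket = True
--                 else:
--                     validBracket = False
--                 openBracketPos = x
--             elif token == 'or':
--                 validBracket = True
--             elif token == ')':
--                 if not validBracket:
--                     invalidBrackets.add(openBracketPos)
--                     invalidBrackets.add(x)
--                 if validBracketHistoryStack:
--                     top = validBracketHistoryStack.pop()
--                     openBracketPos = top[0]
--                     validBracket = top[1]
--                 else:
--                     openBracketPos = -1
--                     validBracket = False
--                     withinBrackets = False
--         else: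
--             if token == '(':
--                 if hasNotOperator:
--                     validBracket = True
--                 else:
--                     validBracket = False
--                 withinBrackets = True
--                 openBracketPos = x
--
--         if token == 'not':
--             hasNotOperator = True
--         else:
--             hasNotOperator = False
--
--     output = []
--     for x in range(len(queryList)):
--         if x not in invalidBrackets:
--             output.append(queryList[x])
--
--     return output
-- ===== SOURCE B (Python) =====
-- def removeRedundantBrackets(queryList):
--     ''' Same result as the stack-based original, by recursive descent:
--         parse(i) scans one bracket level from index i, returning the
--         position of its closing ')' (or len if unclosed) and whether an
--         'or' occurs directly at that level; a closed group is redundant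
--         unless it was preceded by 'not' or directly contains an 'or'. '''
--     n = len(queryList)
--     invalid = set()
--
--     def parse(i):
--         has_or = False
--         while i < n:
--             token = queryList[i]
--             if token == ')':
--                 return i, has_or
--             if token == '(':
--                 prev_not = i > 0 and queryList[i - 1] == 'not'
--                 close, inner_or = parse(i + 1)
--                 if close < n:
--                     if not (prev_not or inner_or):
--                         invalid.add(i)
--                         invalid.add(close)
--                     i = close + 1
--                 else:
--                     i = n
--             else:
--                 if token == 'or':
--                     has_or = True
--                 i += 1
--         return n, has_or
--
--     i = 0
--     while i < n:
--         token = queryList[i]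
--         if token == '(':
--             prev_not = i > 0 and queryList[i - 1] == 'not'
--             close, inner_or = parse(i + 1)
--             if close < n:
--                 if not (prev_not or inner_or):
--                     invalid.add(i)
--                     invalid.add(close)
--                 i = close + 1
--             else:
--                 i = n
--         else:
--             i += 1
--
--     return [queryList[x] for x in range(n) if x not in invalid]
-- ===== Notes on version B (the rewrite author's own statement) =====
-- stated objective: alternative
-- what changed: Replaces A's single pass that threads six mutable state variables through an explicit (openPos, validBracket) history stack with a recursive-descent parser: a cursor-based parse(level) that recurses on '(' and reports the matching ')' position and a per-level 'or' flag, marking a closed group redundant unless it was preceded by 'not' or directly contains an 'or'.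
import Mathlib
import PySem

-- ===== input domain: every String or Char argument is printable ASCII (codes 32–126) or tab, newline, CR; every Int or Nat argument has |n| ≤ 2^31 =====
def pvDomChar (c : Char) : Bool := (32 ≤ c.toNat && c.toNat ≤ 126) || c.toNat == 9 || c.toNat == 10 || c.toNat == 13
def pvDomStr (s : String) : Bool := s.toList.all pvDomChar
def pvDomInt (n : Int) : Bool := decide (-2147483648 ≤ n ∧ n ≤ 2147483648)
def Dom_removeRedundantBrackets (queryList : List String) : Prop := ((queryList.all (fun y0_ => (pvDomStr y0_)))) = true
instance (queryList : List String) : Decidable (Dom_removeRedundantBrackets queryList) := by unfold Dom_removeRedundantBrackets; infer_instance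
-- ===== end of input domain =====

-- B re-implements the bracket cleaner as a recursive-descent parser (cursor + per-level
-- 'or' flag) instead of A's single pass with an explicit history stack; objective:
-- alternative structure, same O(n) cost.

-- ===== PORT A =====
-- A's single for-loop over range(len(queryList)) with its six state variables
-- (hasNotOperator, withinBrackets, validBracket, openBracketPos, the history stack,
-- and the invalid set), one recursive call per iteration.
def removeRedundantBracketsLoopA (q : List String) (i : Nat)
    (hasNot withinB valid : Bool) (openPos : Int)
    (st : List (Int × Bool)) (inv : PySem.Set Int) : PySem.Set Int :=
  if h : i < q.length then
    let token := q.getD i ""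
    let hn' := token == "not"
    if withinB then
      if token = "(" then
        removeRedundantBracketsLoopA q (i+1) hn' true hasNot (i : Int) ((openPos, valid) :: st) inv
      else if token = "or" then
        removeRedundantBracketsLoopA q (i+1) hn' true true openPos st inv
      else if token = ")" then
        let inv2 := if valid then inv else (inv.add openPos).add (i : Int)
        match st with
        | top :: rest => removeRedundantBracketsLoopA q (i+1) hn' true top.2 top.1 rest inv2
        | [] => removeRedundantBracketsLoopA q (i+1) hn' false false (-1) [] inv2
      else
        removeRedundantBracketsLoopA q (i+1) hn' true valid openPos st inv
    else
      if token = "(" then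
        removeRedundantBracketsLoopA q (i+1) hn' true hasNot (i : Int) st inv
      else
        removeRedundantBracketsLoopA q (i+1) hn' false valid openPos st inv
  else inv
termination_by q.length - i

def removeRedundantBrackets (queryList : List String) : List String :=
  let inv := removeRedundantBracketsLoopA queryList 0 false false false (-1) [] PySem.Set.empty
  (List.range queryList.length).foldl
    (fun out (x : Nat) => if !(inv.contains (x : Int)) then out ++ [queryList.getD x ""] else out) []

-- ===== PORT B =====
-- prev_not = i > 0 and queryList[i-1] == 'not'
def rrbPrevNot (q : List String) (i : Nat) : Bool :=
  decide (0 < i) && (q.getD (i-1) "" == "not")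

-- B's parse(i): scan one bracket level from i; returns (position of closing ')' or len,
-- has_or at this level, invalid set).  fuel only makes the while-loop total; it is
-- always called with fuel > len - i, where it never runs out.
def rrbParseB (q : List String) : Nat → Nat → Bool → PySem.Set Int → Nat × Bool × PySem.Set Int
  | 0, _, hasOr, inv => (q.length, hasOr, inv)
  | fuel+1, i, hasOr, inv =>
    if _h : i < q.length then
      let token := q.getD i ""
      if token = ")" then (i, hasOr, inv)
      else if token = "(" then
        let pn := rrbPrevNot q i
        let r := rrbParseB q fuel (i+1) false inv
        if r.1 < q.length then
          let inv2 := if pn || r.2.1 then r.2.2 else (r.2.2.add (i : Int)).add (r.1 : Int)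
          rrbParseB q fuel (r.1+1) hasOr inv2
        else (q.length, hasOr, r.2.2)
      else rrbParseB q fuel (i+1) (hasOr || token == "or") inv
    else (q.length, hasOr, inv)

-- B's top-level while loop over the cursor i.
def rrbTopB (q : List String) : Nat → Nat → PySem.Set Int → PySem.Set Int
  | 0, _, inv => inv
  | fuel+1, i, inv =>
    if _h : i < q.length then
      let token := q.getD i ""
      if token = "(" then
        let pn := rrbPrevNot q i
        let r := rrbParseB q (q.length+1) (i+1) false inv
        if r.1 < q.length then
          let inv2 := if pn || r.2.1 then r.2.2 else (r.2.2.add (i : Int)).add (r.1 : Int)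
          rrbTopB q fuel (r.1+1) inv2
        else r.2.2
      else rrbTopB q fuel (i+1) inv
    else inv

def removeRedundantBrackets_alt (queryList : List String) : List String :=
  let inv := rrbTopB queryList (queryList.length+1) 0 PySem.Set.empty
  ((List.range queryList.length).filter (fun (x : Nat) => !(inv.contains (x : Int)))).map
    (fun x => queryList.getD x "")

-- ===== PRECONDITION & SPEC =====
def Spec_removeRedundantBrackets (queryList : List String) (out : List String) : Prop := out = removeRedundantBrackets_alt queryList
instance (queryList : List String) (out : List String) : Decidable (Spec_removeRedundantBrackets queryList out) := by unfold Spec_removeRedundantBrackets; infer_instance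

-- ===== CLAIM (what is proved, stated in full; the proofs are below) =====
def Claim_equal_removeRedundantBrackets : Prop := ∀ (queryList : List String), Dom_removeRedundantBrackets queryList → Spec_removeRedundantBrackets queryList (removeRedundantBrackets queryList)

-- ===== LEMMAS AND PROOFS =====

-- bounds of parse's returned close position, and that it really points at ')'
theorem rrbParseB_bounds (q : List String) (fuel i : Nat) (o : Bool) (inv : PySem.Set Int)
    (hi : i ≤ q.length) :
    i ≤ (rrbParseB q fuel i o inv).1 ∧ (rrbParseB q fuel i o inv).1 ≤ q.length ∧
      ((rrbParseB q fuel i o inv).1 < q.length → q.getD (rrbParseB q fuel i o inv).1 "" = ")") := by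
  induction fuel generalizing i o inv with
  | zero => simp [rrbParseB]; omega
  | succ f ih =>
    by_cases h : i < q.length
    · rw [rrbParseB]
      simp only [dif_pos h]
      by_cases h1 : q.getD i "" = ")"
      · rw [if_pos h1]; exact ⟨le_refl _, by omega, fun _ => h1⟩
      · by_cases h2 : q.getD i "" = "("
        · simp only [if_neg h1, if_pos h2]
          have hb := ih (i+1) false inv (by omega)
          by_cases h3 : (rrbParseB q f (i+1) false inv).1 < q.length
          · simp only [if_pos h3]
            have hb2 := ih ((rrbParseB q f (i+1) false inv).1+1) o
              (if rrbPrevNot q i || (rrbParseB q f (i+1) false inv).2.1 then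
                 (rrbParseB q f (i+1) false inv).2.2
               else (((rrbParseB q f (i+1) false inv).2.2).add (i : Int)).add
                 ((rrbParseB q f (i+1) false inv).1 : Int)) (by omega)
            refine ⟨by omega, hb2.2.1, hb2.2.2⟩
          · rw [if_neg h3]; exact ⟨by omega, le_refl _, fun hh => absurd hh (lt_irrefl _)⟩
        · simp only [if_neg h1, if_neg h2]
          have hb := ih (i+1) (o || (q.getD i "" == "or")) inv (by omega)
          exact ⟨by omega, hb.2.1, hb.2.2⟩
    · rw [rrbParseB]; rw [dif_neg h]; exact ⟨hi, le_refl _, fun hh => absurd hh (lt_irrefl _)⟩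

-- main inner correspondence: A's loop in a 'withinBrackets' state vs B's parse
theorem rrb_inner (q : List String) (fuel : Nat) :
    ∀ (i : Nat) (v o pn : Bool) (p : Int) (st : List (Int × Bool)) (inv : PySem.Set Int),
    q.length - i < fuel → (pn || o) = v →
    removeRedundantBracketsLoopA q i (rrbPrevNot q i) true v p st inv =
      (if (rrbParseB q fuel i o inv).1 < q.length then
         match st with
         | top :: rest =>
             removeRedundantBracketsLoopA q ((rrbParseB q fuel i o inv).1+1) false true top.2 top.1 rest
               (if pn || (rrbParseB q fuel i o inv).2.1 then (rrbParseB q fuel i o inv).2.2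
                else (((rrbParseB q fuel i o inv).2.2).add p).add (((rrbParseB q fuel i o inv).1 : Nat) : Int))
         | [] =>
             removeRedundantBracketsLoopA q ((rrbParseB q fuel i o inv).1+1) false false false (-1) []
               (if pn || (rrbParseB q fuel i o inv).2.1 then (rrbParseB q fuel i o inv).2.2
                else (((rrbParseB q fuel i o inv).2.2).add p).add (((rrbParseB q fuel i o inv).1 : Nat) : Int))
       else (rrbParseB q fuel i o inv).2.2) := by
  induction fuel with
  | zero => intro i v o pn p st inv hf hv; omega
  | succ f ih =>
    intro i v o pn p st inv hf hv
    by_cases h : i < q.length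
    · have hg : q.getD i "" = q[i] := List.getD_eq_getElem _ _ h
      by_cases h1 : q[i] = ")"
      · conv_lhs => rw [removeRedundantBracketsLoopA]
        rw [rrbParseB]
        cases st <;> simp [h1, h, ← hv]
      · by_cases h2 : q[i] = "("
        · have hb := rrbParseB_bounds q f (i+1) false inv (by omega)
          have hpn1 : rrbPrevNot q (i+1) = false := by
            simp [rrbPrevNot, h, h2]
          have H := ih (i+1) (rrbPrevNot q i) false (rrbPrevNot q i) ((i : Nat) : Int)
            ((p, v) :: st) inv (by omega) (by simp)
          rw [hpn1] at H
          conv_lhs => rw [removeRedundantBracketsLoopA]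
          by_cases hc : (rrbParseB q f (i+1) false inv).1 < q.length
          · have hcq : q[(rrbParseB q f (i+1) false inv).1]'hc = ")" := by
              rw [← List.getD_eq_getElem _ _ hc]; exact hb.2.2 hc
            have hpn2 : rrbPrevNot q ((rrbParseB q f (i+1) false inv).1+1) = false := by
              simp [rrbPrevNot, hc, hcq]
            have H2 := ih ((rrbParseB q f (i+1) false inv).1+1) v o pn p st
              (if rrbPrevNot q i || (rrbParseB q f (i+1) false inv).2.1 then
                 (rrbParseB q f (i+1) false inv).2.2
               else (((rrbParseB q f (i+1) false inv).2.2).add ((i : Nat) : Int)).add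
                 (((rrbParseB q f (i+1) false inv).1 : Nat) : Int))
              (by omega) hv
            rw [hpn2] at H2
            rw [rrbParseB]
            simp only [h, h2, hc] at H ⊢
            simp [h, h1, h2, hc, H]
            simpa using H2
          · rw [rrbParseB]
            simp only [h, h2, hc] at H ⊢
            simp [h, h1, h2, hc, H]
        · by_cases h3 : q[i] = "or"
          · have H := ih (i+1) true true pn p st inv (by omega) (by simp)
            have hpn1 : rrbPrevNot q (i+1) = false := by
              simp [rrbPrevNot, h, h3]
            rw [hpn1] at H
            conv_lhs => rw [removeRedundantBracketsLoopA]
            rw [rrbParseB]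
            simp [h, h1, h3, H]
          · have H := ih (i+1) v o pn p st inv (by omega) hv
            have hpn1 : rrbPrevNot q (i+1) = (q[i] == "not") := by
              simp [rrbPrevNot, h]
            have ho : (q[i] == "or") = false := by simp [h3]
            rw [hpn1] at H
            conv_lhs => rw [removeRedundantBracketsLoopA]
            rw [rrbParseB]
            simp [h, h1, h2, h3, ho, H]
    · conv_lhs => rw [removeRedundantBracketsLoopA]
      rw [rrbParseB]
      simp [h]

-- top-level correspondence: A's loop outside brackets vs B's top-level loop
theorem rrb_top (q : List String) (fuel : Nat) :
    ∀ (i : Nat) (v : Bool) (p : Int) (inv : PySem.Set Int),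
    q.length - i < fuel →
    removeRedundantBracketsLoopA q i (rrbPrevNot q i) false v p [] inv =
      rrbTopB q fuel i inv := by
  induction fuel with
  | zero => intro i v p inv hf; omega
  | succ f ih =>
    intro i v p inv hf
    by_cases h : i < q.length
    · have hg : q.getD i "" = q[i] := List.getD_eq_getElem _ _ h
      by_cases h2 : q[i] = "("
      · have hb := rrbParseB_bounds q (q.length+1) (i+1) false inv (by omega)
        have H := rrb_inner q (q.length+1) (i+1) (rrbPrevNot q i) false (rrbPrevNot q i)
          ((i : Nat) : Int) [] inv (by omega) (by simp)
        have hpn1 : rrbPrevNot q (i+1) = false := by simp [rrbPrevNot, h, h2]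
        rw [hpn1] at H
        conv_lhs => rw [removeRedundantBracketsLoopA]
        rw [rrbTopB]
        by_cases hc : (rrbParseB q (q.length+1) (i+1) false inv).1 < q.length
        · have hcq : q[(rrbParseB q (q.length+1) (i+1) false inv).1]'hc = ")" := by
            rw [← List.getD_eq_getElem _ _ hc]; exact hb.2.2 hc
          have hpn2 : rrbPrevNot q ((rrbParseB q (q.length+1) (i+1) false inv).1+1) = false := by
            simp [rrbPrevNot, hc, hcq]
          have H2 := ih ((rrbParseB q (q.length+1) (i+1) false inv).1+1) false (-1)
            (if rrbPrevNot q i || (rrbParseB q (q.length+1) (i+1) false inv).2.1 then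
               (rrbParseB q (q.length+1) (i+1) false inv).2.2
             else (((rrbParseB q (q.length+1) (i+1) false inv).2.2).add ((i : Nat) : Int)).add
               (((rrbParseB q (q.length+1) (i+1) false inv).1 : Nat) : Int)) (by omega)
          rw [hpn2] at H2
          simp [h, h2, hc, H]
          simpa using H2
        · simp [h, h2, hc, H]
      · have H := ih (i+1) v p inv (by omega)
        have hpn1 : rrbPrevNot q (i+1) = (q[i] == "not") := by simp [rrbPrevNot, h]
        rw [hpn1] at H
        conv_lhs => rw [removeRedundantBracketsLoopA]
        rw [rrbTopB]
        simp [h, h2, H]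
    · conv_lhs => rw [removeRedundantBracketsLoopA]
      rw [rrbTopB]
      simp [h]

-- ===== VERDICT (by name: the statement is the Claim_ definition above) =====
theorem removeRedundantBrackets_spec : Claim_equal_removeRedundantBrackets := by
  intro q _hdom
  unfold Spec_removeRedundantBrackets removeRedundantBrackets removeRedundantBrackets_alt
  have h0 : rrbPrevNot q 0 = false := by simp [rrbPrevNot]
  rw [show removeRedundantBracketsLoopA q 0 false false false (-1) [] PySem.Set.empty
        = rrbTopB q (q.length+1) 0 PySem.Set.empty from by
      rw [← h0]; exact rrb_top q (q.length+1) 0 false (-1) PySem.Set.empty (by omega)]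
  exact PySem.List.foldl_append_if _ _ _ _
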